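-- pv_equiv track=rewrite | github.com/TheIllusionOfLife/Factorization | prototype.py | blend_modulus_filters
-- ===== SOURCE A (Python) =====
-- from typing import Callable, Dict, List, Sequence, Tuple
--
-- def blend_modulus_filters(
--     filters1: List[Tuple[int, List[int]]],
--     filters2: List[Tuple[int, List[int]]],
--     max_filters: int = 4,
-- ) -> List[Tuple[int, List[int]]]:
--     """
--     Blend modulus filters from two parents, prioritizing diversity.
--
--     Combines filters from both parents:
--     - Merges filters with same modulus (union of residues)
--     - Keeps unique filters from each parent
--     - Limits total to max_filters (prioritizes smaller moduli)
--
--     Args: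
--         filters1: Modulus filters from parent 1
--         filters2: Modulus filters from parent 2
--         max_filters: Maximum number of filters to keep (default: 4)
--
--     Returns:
--         Blended list of (modulus, residues) tuples
--     """
--     # Merge filters by modulus
--     filter_dict = {}
--
--     for modulus, residues in filters1 + filters2:
--         if modulus in filter_dict:
--             # Merge residues for same modulus
--             filter_dict[modulus] = sorted(set(filter_dict[modulus] + residues))
--         else:
--             filter_dict[modulus] = sorted(set(residues))
--
--     # Convert back to list, sorted by modulus (prioritize smaller moduli)
--     blended = [(mod, res) for mod, res in sorted(filter_dict.items())]
--
--     # Limit to max_filters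
--     return blended[:max_filters]
-- ===== SOURCE B (Python) =====
-- def blend_modulus_filters(filters1, filters2, max_filters=4):
--     combined = sorted(filters1 + filters2, key=lambda t: t[0])
--     groups = []
--     for m, rs in combined:
--         if groups and groups[-1][0] == m:
--             groups[-1][1].extend(rs)
--         else:
--             groups.append((m, list(rs)))
--     return [(m, sorted(set(rs))) for m, rs in groups[:max_filters]]
-- ===== Notes on version B (the rewrite author's own statement) =====
-- stated objective: alternative
-- what changed: Replaces A's dict that merges and re-sorts residue sets on every duplicate modulus (then sorts the items) with a single sort of the concatenated list by modulus followed by a linear adjacent-group sweep, slicing first and dedup-sorting each kept group's residues once.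
import Mathlib
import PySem

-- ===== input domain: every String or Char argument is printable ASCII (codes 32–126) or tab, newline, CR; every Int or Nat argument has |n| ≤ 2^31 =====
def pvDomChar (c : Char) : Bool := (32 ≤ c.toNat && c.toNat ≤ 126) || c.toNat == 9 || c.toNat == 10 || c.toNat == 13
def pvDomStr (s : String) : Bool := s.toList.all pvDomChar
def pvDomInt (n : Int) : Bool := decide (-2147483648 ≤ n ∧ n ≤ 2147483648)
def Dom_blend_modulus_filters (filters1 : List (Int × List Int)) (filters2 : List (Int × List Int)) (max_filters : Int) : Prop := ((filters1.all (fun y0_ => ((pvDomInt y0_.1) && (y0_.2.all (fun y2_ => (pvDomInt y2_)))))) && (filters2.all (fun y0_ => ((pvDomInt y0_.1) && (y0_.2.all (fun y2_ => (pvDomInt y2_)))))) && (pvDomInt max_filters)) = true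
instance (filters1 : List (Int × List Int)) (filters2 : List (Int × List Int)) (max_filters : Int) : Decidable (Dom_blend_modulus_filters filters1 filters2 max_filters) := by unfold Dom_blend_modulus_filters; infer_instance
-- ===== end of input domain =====

-- B replaces A's mutable dict (merge + re-sort on each duplicate modulus) with one grouped
-- comprehension over the sorted distinct moduli; same return value, no speed claim.

-- ===== PORT A =====
-- one iteration of A's dict-building loop
def pvStepA (d : PySem.Dict Int (List Int)) (p : Int × List Int) : PySem.Dict Int (List Int) :=
  if d.contains p.1 then
    d.insert p.1 (PySem.List.sorted (PySem.Set.ofList (d.getD p.1 [] ++ p.2)) (fun x => x))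
  else
    d.insert p.1 (PySem.List.sorted (PySem.Set.ofList p.2) (fun x => x))

def blend_modulus_filters (filters1 : List (Int × List Int)) (filters2 : List (Int × List Int)) (max_filters : Int) : List (Int × List Int) :=
  let filter_dict := (filters1 ++ filters2).foldl pvStepA PySem.Dict.empty
  -- sorted(filter_dict.items()): dict keys are distinct, so Python's tuple sort never
  -- compares the residue lists; sorting the pairs by modulus is exact here.
  let blended := PySem.List.sorted filter_dict.items (fun p => p.1)
  PySem.List.slice blended none (some max_filters)

-- ===== PORT B =====
-- one iteration of B's sweep: extend the last group when the modulus repeats, else open a new one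
def pvSweepStep (groups : List (Int × List Int)) (p : Int × List Int) : List (Int × List Int) :=
  match groups.getLast? with
  | some q => if q.1 = p.1 then groups.dropLast ++ [(q.1, q.2 ++ p.2)] else groups ++ [(p.1, p.2)]
  | none => groups ++ [(p.1, p.2)]

def blend_modulus_filters_alt (filters1 : List (Int × List Int)) (filters2 : List (Int × List Int)) (max_filters : Int) : List (Int × List Int) :=
  let combined := PySem.List.sorted (filters1 ++ filters2) (fun t => t.1)
  let groups := combined.foldl pvSweepStep []
  (PySem.List.slice groups none (some max_filters)).map
    (fun g => (g.1, PySem.List.sorted (PySem.Set.ofList g.2) (fun x => x)))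

-- ===== PRECONDITION & SPEC =====
def Spec_blend_modulus_filters (filters1 : List (Int × List Int)) (filters2 : List (Int × List Int)) (max_filters : Int) (out : List (Int × List Int)) : Prop := out = blend_modulus_filters_alt filters1 filters2 max_filters
instance (filters1 : List (Int × List Int)) (filters2 : List (Int × List Int)) (max_filters : Int) (out : List (Int × List Int)) : Decidable (Spec_blend_modulus_filters filters1 filters2 max_filters out) := by unfold Spec_blend_modulus_filters; infer_instance

-- ===== CLAIM (what is proved, stated in full; the proofs are below) =====
def Claim_equal_blend_modulus_filters : Prop := ∀ (filters1 : List (Int × List Int)) (filters2 : List (Int × List Int)) (max_filters : Int), Dom_blend_modulus_filters filters1 filters2 max_filters → Spec_blend_modulus_filters filters1 filters2 max_filters (blend_modulus_filters filters1 filters2 max_filters)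

-- ===== LEMMAS AND PROOFS =====

-- all residues of entries with modulus m, in list order (proof-side abbreviation)
def pvCollect (combined : List (Int × List Int)) (m : Int) : List Int :=
  (combined.filter (fun p => p.1 == m)).flatMap (fun p => p.2)

-- sorted(set(·)) depends only on membership
theorem pvSortedSet_ext (a b : List Int) (h : ∀ x, x ∈ a ↔ x ∈ b) :
    PySem.List.sorted (PySem.Set.ofList a) (fun x => x)
      = PySem.List.sorted (PySem.Set.ofList b) (fun x => x) := by
  apply PySem.List.sorted_eq_of_perm_of_pairwise_lt
  · exact ((PySem.List.sorted_perm (PySem.Set.ofList b) (fun x => x) false).trans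
      (((List.perm_ext_iff_of_nodup (PySem.Set.nodup_ofList b) (PySem.Set.nodup_ofList a)).2
        (fun x => by simp [PySem.Set.mem_ofList, h x]))))
  · have hle := PySem.List.sorted_pairwise (PySem.Set.ofList b) (fun x => x)
    have hnd : (PySem.List.sorted (PySem.Set.ofList b) (fun x => x)).Nodup :=
      ((PySem.List.sorted_perm (PySem.Set.ofList b) (fun x => x) false).nodup_iff).2
        (PySem.Set.nodup_ofList b)
    exact (hle.and hnd).imp (fun hp => lt_of_le_of_ne hp.1 hp.2)

-- A's loop in the uniform 'insert (key x) (f d x)' shape PySem's foldl lemmas match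
theorem pvStepA_eq (d : PySem.Dict Int (List Int)) (p : Int × List Int) :
    pvStepA d p = d.insert p.1
      (if d.contains p.1
        then PySem.List.sorted (PySem.Set.ofList (d.getD p.1 [] ++ p.2)) (fun x => x)
        else PySem.List.sorted (PySem.Set.ofList p.2) (fun x => x)) := by
  unfold pvStepA
  exact (apply_ite (d.insert p.1) _ _ _).symm

theorem pvKeysA (L : List (Int × List Int)) :
    (L.foldl pvStepA PySem.Dict.empty).keys = PySem.Set.ofList (L.map (fun p => p.1)) := by
  have h : L.foldl pvStepA PySem.Dict.empty
      = L.foldl (fun d p => d.insert p.1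
          (if d.contains p.1
            then PySem.List.sorted (PySem.Set.ofList (d.getD p.1 [] ++ p.2)) (fun x => x)
            else PySem.List.sorted (PySem.Set.ofList p.2) (fun x => x))) PySem.Dict.empty := by
    apply PySem.List.foldl_congr_mem
    intro d p _
    exact pvStepA_eq d p
  rw [h, PySem.Dict.keys_foldl_insert_key, PySem.Dict.keys_empty, PySem.Set.update_nil_left]

theorem pvContainsA (L : List (Int × List Int)) (m : Int) :
    (L.foldl pvStepA PySem.Dict.empty).contains m = decide (m ∈ L.map (fun p => p.1)) := by
  rw [PySem.Dict.contains_eq_decide_mem_keys, pvKeysA]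
  simp [PySem.Set.mem_ofList]

theorem pvCollect_append_singleton (L : List (Int × List Int)) (p : Int × List Int) (m : Int) :
    pvCollect (L ++ [p]) m = pvCollect L m ++ (if p.1 = m then p.2 else []) := by
  unfold pvCollect
  rw [List.filter_append]
  by_cases h : p.1 = m <;> simp [h]

theorem pvCollect_eq_nil_of_not_mem (L : List (Int × List Int)) (m : Int)
    (h : m ∉ L.map (fun p => p.1)) : pvCollect L m = [] := by
  unfold pvCollect
  have : L.filter (fun p => p.1 == m) = [] := by
    rw [List.filter_eq_nil_iff]
    intro p hp hbeq
    exact h (List.mem_map.2 ⟨p, hp, by simpa using hbeq⟩)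
  rw [this, List.flatMap_nil]

-- the dict's stored value at m is sorted(set(all residues of m seen so far))
theorem pvGetDA (L : List (Int × List Int)) (m : Int) :
    (L.foldl pvStepA PySem.Dict.empty).getD m []
      = if m ∈ L.map (fun p => p.1)
          then PySem.List.sorted (PySem.Set.ofList (pvCollect L m)) (fun x => x)
          else [] := by
  induction L using List.reverseRecOn with
  | nil => simp
  | append_singleton L p ih =>
    rw [List.foldl_append, List.foldl_cons, List.foldl_nil, pvStepA_eq,
      PySem.Dict.getD_insert, pvContainsA, pvCollect_append_singleton]
    by_cases hm : m = p.1
    · subst hm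
      by_cases hmem : p.1 ∈ L.map (fun q => q.1)
      · rw [ih, if_pos hmem]
        simp only [hmem, decide_true, if_true, List.map_append,
          List.mem_append, or_true, List.mem_singleton, List.map_cons, List.map_nil]
        exact pvSortedSet_ext _ _ (fun x => by
          simp [PySem.List.mem_sorted, PySem.Set.mem_ofList])
      · rw [ih, if_neg hmem, pvCollect_eq_nil_of_not_mem L p.1 hmem]
        simp [hmem]
    · have hpm : ¬ p.1 = m := fun he => hm he.symm
      rw [ih]
      simp only [hm, hpm, if_false, List.append_nil]
      by_cases hmem : m ∈ L.map (fun q => q.1)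
      · rw [if_pos hmem, if_pos (by simp [hmem])]
      · rw [if_neg hmem, if_neg (by simp [hmem, hm])]

-- A's sorted items list IS B's comprehension
theorem pvBlended_eq (L : List (Int × List Int)) :
    PySem.List.sorted (L.foldl pvStepA PySem.Dict.empty).items (fun p => p.1)
      = (PySem.List.sorted (PySem.Set.ofList (L.map (fun p => p.1))) (fun x => x)).map
          (fun m => (m, PySem.List.sorted (PySem.Set.ofList (pvCollect L m)) (fun x => x))) := by
  have hnd : (L.foldl pvStepA PySem.Dict.empty).keys.Nodup := by
    rw [pvKeysA]; exact PySem.Set.nodup_ofList _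
  have hitems := PySem.Dict.items_eq_map_keys (L.foldl pvStepA PySem.Dict.empty) hnd []
  rw [hitems, pvKeysA]
  have hmapeq : (PySem.Set.ofList (L.map (fun p => p.1))).map
        (fun k => (k, (L.foldl pvStepA PySem.Dict.empty).getD k []))
      = (PySem.Set.ofList (L.map (fun p => p.1))).map
        (fun m => (m, PySem.List.sorted (PySem.Set.ofList (pvCollect L m)) (fun x => x))) := by
    apply List.map_congr_left
    intro k hk
    have hkm : k ∈ L.map (fun p => p.1) := (PySem.Set.mem_ofList _ k).1 hk
    rw [pvGetDA L k, if_pos hkm]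
  rw [hmapeq]
  -- sorting pairs with distinct first components = mapping over the sorted keys
  apply PySem.List.sorted_eq_of_perm_of_pairwise_lt
  · exact (PySem.List.sorted_perm (PySem.Set.ofList (L.map (fun p => p.1))) (fun x => x) false).map _
  · have hle := PySem.List.sorted_pairwise (PySem.Set.ofList (L.map (fun p => p.1))) (fun x => x)
    have hnd' : (PySem.List.sorted (PySem.Set.ofList (L.map (fun p => p.1))) (fun x => x)).Nodup :=
      ((PySem.List.sorted_perm _ (fun x => x) false).nodup_iff).2 (PySem.Set.nodup_ofList _)
    have hlt := (hle.and hnd').imp (fun hp => lt_of_le_of_ne hp.1 hp.2)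
    exact hlt.map _ (fun a b hab => hab)

theorem pvCollect_mem_iff (l : List (Int × List Int)) (m x : Int) :
    x ∈ pvCollect l m ↔ ∃ p ∈ l, p.1 = m ∧ x ∈ p.2 := by
  simp [pvCollect, List.mem_flatMap, List.mem_filter, and_assoc]

theorem pvOfList_sublist (xs : List Int) : (PySem.Set.ofList xs).Sublist xs := by
  induction xs using List.reverseRecOn with
  | nil => simp [PySem.Set.ofList_nil]
  | append_singleton xs x ih =>
    rw [PySem.Set.ofList_append_singleton]
    by_cases h : x ∈ PySem.Set.ofList xs
    · rw [PySem.Set.add_of_mem h]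
      exact ih.trans (List.sublist_append_left xs [x])
    · rw [PySem.Set.add_of_not_mem h]
      exact ih.append (List.Sublist.refl [x])

theorem pvMapSlice (l : List (Int × List Int)) (f : (Int × List Int) → (Int × List Int)) (b : Int) :
    (PySem.List.slice l none (some b)).map f = PySem.List.slice (l.map f) none (some b) := by
  simp [PySem.List.slice, List.map_take]

-- the sweep over a modulus-sorted list produces one group per distinct modulus, in order
theorem pvSweep_eq (l : List (Int × List Int)) (h : l.Pairwise (fun a b => a.1 ≤ b.1)) :
    l.foldl pvSweepStep []
      = (PySem.Set.ofList (l.map (fun q => q.1))).map (fun m => (m, pvCollect l m)) := by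
  induction l using List.reverseRecOn with
  | nil => simp [PySem.Set.ofList_nil]
  | append_singleton l p ih =>
    have hpair : l.Pairwise (fun a b => a.1 ≤ b.1) := (List.pairwise_append.1 h).1
    have hble : ∀ k ∈ l.map (fun q => q.1), k ≤ p.1 := by
      intro k hk
      rcases List.mem_map.1 hk with ⟨q, hq, rfl⟩
      exact (List.pairwise_append.1 h).2.2 q hq p (List.mem_singleton.2 rfl)
    rw [List.foldl_append, List.foldl_cons, List.foldl_nil, ih hpair,
      show (l ++ [p]).map (fun q => q.1) = l.map (fun q => q.1) ++ [p.1] by simp,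
      PySem.Set.ofList_append_singleton]
    by_cases hl : l = []
    · subst hl
      simp [pvSweepStep, PySem.Set.ofList_nil, pvCollect, PySem.Set.add]
    · have hD : PySem.Set.ofList (l.map (fun q => q.1)) ≠ [] := by
        intro he
        rcases List.exists_mem_of_ne_nil l hl with ⟨q, hq⟩
        have hq1 : q.1 ∈ PySem.Set.ofList (l.map (fun q => q.1)) :=
          (PySem.Set.mem_ofList _ _).2 (List.mem_map.2 ⟨q, hq, rfl⟩)
        rw [he] at hq1
        exact absurd hq1 (List.not_mem_nil)
      have hDdec := List.dropLast_append_getLast hD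
      have hDle : (PySem.Set.ofList (l.map (fun q => q.1))).Pairwise (· ≤ ·) :=
        List.Pairwise.sublist (pvOfList_sublist _) ((List.pairwise_map).2 hpair)
      have hDlt : (PySem.Set.ofList (l.map (fun q => q.1))).Pairwise (· < ·) :=
        (hDle.and (PySem.Set.nodup_ofList _)).imp (fun hp => lt_of_le_of_ne hp.1 hp.2)
      have hDle' : ((PySem.Set.ofList (l.map (fun q => q.1))).dropLast
          ++ [(PySem.Set.ofList (l.map (fun q => q.1))).getLast hD]).Pairwise (· ≤ ·) := by
        rw [hDdec]; exact hDle
      have hDlt' : ((PySem.Set.ofList (l.map (fun q => q.1))).dropLast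
          ++ [(PySem.Set.ofList (l.map (fun q => q.1))).getLast hD]).Pairwise (· < ·) := by
        rw [hDdec]; exact hDlt
      have hbmem : (PySem.Set.ofList (l.map (fun q => q.1))).getLast hD ∈ l.map (fun q => q.1) :=
        (PySem.Set.mem_ofList _ _).1 (List.getLast_mem hD)
      have hmaxD : ∀ x ∈ PySem.Set.ofList (l.map (fun q => q.1)),
          x ≤ (PySem.Set.ofList (l.map (fun q => q.1))).getLast hD := by
        intro x hx
        rw [← hDdec] at hx
        rcases List.mem_append.1 hx with hx' | hx'
        · exact (List.pairwise_append.1 hDle').2.2 x hx' _ (List.mem_singleton.2 rfl)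
        · exact le_of_eq (List.mem_singleton.1 hx')
      have hlast : ((PySem.Set.ofList (l.map (fun q => q.1))).map (fun m => (m, pvCollect l m))).getLast?
          = some ((PySem.Set.ofList (l.map (fun q => q.1))).getLast hD,
              pvCollect l ((PySem.Set.ofList (l.map (fun q => q.1))).getLast hD)) := by
        rw [List.getLast?_map, List.getLast?_eq_some_getLast hD]
        rfl
      have hstep : pvSweepStep
            ((PySem.Set.ofList (l.map (fun q => q.1))).map (fun m => (m, pvCollect l m))) p
          = if (PySem.Set.ofList (l.map (fun q => q.1))).getLast hD = p.1
            then ((PySem.Set.ofList (l.map (fun q => q.1))).map (fun m => (m, pvCollect l m))).dropLast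
              ++ [((PySem.Set.ofList (l.map (fun q => q.1))).getLast hD,
                  pvCollect l ((PySem.Set.ofList (l.map (fun q => q.1))).getLast hD) ++ p.2)]
            else ((PySem.Set.ofList (l.map (fun q => q.1))).map (fun m => (m, pvCollect l m)))
              ++ [(p.1, p.2)] := by
        unfold pvSweepStep
        rw [hlast]
      rw [hstep]
      by_cases hbp : (PySem.Set.ofList (l.map (fun q => q.1))).getLast hD = p.1
      · rw [if_pos hbp]
        have hpD : p.1 ∈ PySem.Set.ofList (l.map (fun q => q.1)) := hbp ▸ List.getLast_mem hD
        rw [PySem.Set.add_of_mem hpD]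
        conv_rhs => rw [← hDdec]
        rw [List.map_append, ← List.map_dropLast]
        congr 1
        · apply List.map_congr_left
          intro m hm
          have hmlt : m < (PySem.Set.ofList (l.map (fun q => q.1))).getLast hD :=
            (List.pairwise_append.1 hDlt').2.2 m hm _ (List.mem_singleton.2 rfl)
          have hne : ¬ p.1 = m := fun he => absurd (hbp.trans he) (ne_of_gt hmlt)
          rw [pvCollect_append_singleton, if_neg hne, List.append_nil]
        · simp only [List.map_cons, List.map_nil]
          rw [pvCollect_append_singleton, if_pos hbp.symm]
      · rw [if_neg hbp]
        have hpD : p.1 ∉ PySem.Set.ofList (l.map (fun q => q.1)) := by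
          intro hpD
          exact hbp (le_antisymm (hble _ hbmem) (hmaxD _ hpD))
        rw [PySem.Set.add_of_not_mem hpD, List.map_append]
        congr 1
        · apply List.map_congr_left
          intro m hm
          have hne : ¬ p.1 = m := fun he => hpD (he ▸ hm)
          rw [pvCollect_append_singleton, if_neg hne, List.append_nil]
        · simp only [List.map_cons, List.map_nil]
          have hnl : p.1 ∉ l.map (fun q => q.1) :=
            fun hmem => hpD ((PySem.Set.mem_ofList _ _).2 hmem)
          rw [pvCollect_append_singleton, if_pos rfl,
            pvCollect_eq_nil_of_not_mem l p.1 hnl, List.nil_append]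

-- ===== VERDICT (by name: the statement is the Claim_ definition above) =====
theorem blend_modulus_filters_spec : Claim_equal_blend_modulus_filters := by
  intro filters1 filters2 max_filters _
  unfold Spec_blend_modulus_filters blend_modulus_filters blend_modulus_filters_alt
  show PySem.List.slice
      (PySem.List.sorted ((filters1 ++ filters2).foldl pvStepA PySem.Dict.empty).items (fun p => p.1))
      none (some max_filters)
    = (PySem.List.slice
        ((PySem.List.sorted (filters1 ++ filters2) (fun t => t.1)).foldl pvSweepStep [])
        none (some max_filters)).map
        (fun g => (g.1, PySem.List.sorted (PySem.Set.ofList g.2) (fun x => x)))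
  rw [pvBlended_eq,
    pvSweep_eq _ (PySem.List.sorted_pairwise (filters1 ++ filters2) (fun t => t.1)),
    pvMapSlice, List.map_map]
  have hDK : PySem.List.sorted (PySem.Set.ofList ((filters1 ++ filters2).map (fun p => p.1))) (fun x => x)
      = PySem.Set.ofList ((PySem.List.sorted (filters1 ++ filters2) (fun t => t.1)).map (fun q => q.1)) := by
    apply PySem.List.sorted_eq_of_perm_of_pairwise_lt
    · apply (List.perm_ext_iff_of_nodup (PySem.Set.nodup_ofList _) (PySem.Set.nodup_ofList _)).2
      intro x
      simp only [PySem.Set.mem_ofList]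
      exact ((PySem.List.sorted_perm (filters1 ++ filters2) (fun t => t.1) false).map (fun q => q.1)).mem_iff
    · have hle : (PySem.Set.ofList ((PySem.List.sorted (filters1 ++ filters2) (fun t => t.1)).map (fun q => q.1))).Pairwise (· ≤ ·) :=
        List.Pairwise.sublist (pvOfList_sublist _)
          ((List.pairwise_map).2 (PySem.List.sorted_pairwise (filters1 ++ filters2) (fun t => t.1)))
      exact (hle.and (PySem.Set.nodup_ofList _)).imp (fun hp => lt_of_le_of_ne hp.1 hp.2)
  rw [hDK]
  congr 1
  apply List.map_congr_left
  intro m _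
  dsimp only [Function.comp]
  congr 1
  apply pvSortedSet_ext
  intro x
  rw [pvCollect_mem_iff, pvCollect_mem_iff]
  constructor
  · rintro ⟨q, hq, h1, h2⟩
    exact ⟨q, (PySem.List.sorted_perm (filters1 ++ filters2) (fun t => t.1) false).mem_iff.2 hq, h1, h2⟩
  · rintro ⟨q, hq, h1, h2⟩
    exact ⟨q, (PySem.List.sorted_perm (filters1 ++ filters2) (fun t => t.1) false).mem_iff.1 hq, h1, h2⟩
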